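-- pv_equiv track=rewrite | github.com/devOceanblue/python_coding_test_group | john/5w/snail.py | solution
-- ===== SOURCE A (Python) =====
-- def solution(rounds, horizontal):
--     visited = [[0, 0]]
--     for round in range(1,rounds):
--         # round start
--         if horizontal:
--             # move right
--             item = list(visited[-1])
--             item[1] += 1
--             visited.append(item)
--         else:
--             # move bottom
--             item = list(visited[-1])
--             item[0] += 1
--             visited.append(item)
--
--         for move in range(round*2):
--             if horizontal:
--                 if round > move:
--                     # move bottom
--                     item = list(visited[-1])
--                     item[0] += 1
--                     visited.append(item)
--                 else:
--                     # move left
--                     item = list(visited[-1])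
--                     item[1] -= 1
--                     visited.append(item)
--             else:
--                 if round > move:
--                     # move right
--                     item = list(visited[-1])
--                     item[1] += 1
--                     visited.append(item)
--                 else:
--                     # move up
--                     item = list(visited[-1])
--                     item[0] -= 1
--                     visited.append(item)
--         horizontal = 0 if horizontal else 1
--     return visited
-- ===== SOURCE B (Python) =====
-- import math
--
-- def solution(rounds, horizontal):
--     # Closed form: point i of the spiral is computed directly from i.
--     # Ring k (k = isqrt(i)) occupies indices k*k .. k*k+2k; its start corner
--     # has a closed-form position, and the offset j = i - k*k selects the arm.
--     n = max(rounds, 1)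
--
--     def point(i):
--         k = math.isqrt(i)
--         if k == 0:
--             return [0, 0]
--         p = k - 1
--         q = p // 2
--         odd = p % 2 == 1
--         if horizontal:
--             sr = p if odd else 0
--             sc = 2 * q + (1 - p if odd else 0)
--         else:
--             sr = 2 * q + (1 - p if odd else 0)
--             sc = p if odd else 0
--         flag = (k % 2 == 1) if horizontal else (k % 2 == 0)
--         j = i - k * k
--         if flag:
--             if j == 0:
--                 return [sr, sc + 1]
--             if j <= k:
--                 return [sr + j, sc + 1]
--             return [sr + k, sc + 1 - (j - k)]
--         else:
--             if j == 0:
--                 return [sr + 1, sc]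
--             if j <= k:
--                 return [sr + 1, sc + j]
--             return [sr + 1 - (j - k), sc + k]
--
--     return [point(i) for i in range(n * n)]
-- ===== Notes on version B (the rewrite author's own statement) =====
-- stated objective: alternative
-- what changed: Replaces A's stateful step-by-step walk (each point derived by mutating the previous one) with a closed-form per-index formula: point i is computed independently from i alone via k = isqrt(i), a closed-form ring start corner, and the offset within the ring, so there is no sequential state at all.
import Mathlib
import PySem

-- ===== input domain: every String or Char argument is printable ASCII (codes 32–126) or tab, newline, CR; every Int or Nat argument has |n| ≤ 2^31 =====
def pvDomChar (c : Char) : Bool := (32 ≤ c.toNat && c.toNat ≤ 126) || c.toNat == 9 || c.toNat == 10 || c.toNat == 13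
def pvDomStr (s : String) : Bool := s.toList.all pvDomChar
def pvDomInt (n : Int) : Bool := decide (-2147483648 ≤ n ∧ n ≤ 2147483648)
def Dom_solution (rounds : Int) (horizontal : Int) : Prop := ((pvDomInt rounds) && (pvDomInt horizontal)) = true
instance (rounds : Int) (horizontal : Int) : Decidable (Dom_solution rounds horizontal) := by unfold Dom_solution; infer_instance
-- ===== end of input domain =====

-- B replaces A's stateful step-by-step walk with a closed-form per-index formula:
-- point i is computed from i alone via k = isqrt(i) (objective: alternative).

-- ===== PORT A =====
-- 'item = list(visited[-1]); item[i] += d; visited.append(item)'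
def pvStep (visited : List (List Int)) (i : Nat) (d : Int) : List (List Int) :=
  visited ++ [(visited.getLastD []).modify i (· + d)]

def solution (rounds : Int) (horizontal : Int) : List (List Int) :=
  ((PySem.List.pyRange 1 rounds 1).foldl
    (fun (st : List (List Int) × Int) round =>
      let visited := st.1
      let h := st.2
      let visited := if h ≠ 0 then pvStep visited 1 1 else pvStep visited 0 1
      let visited := (PySem.List.pyRange 0 (round * 2) 1).foldl
        (fun vis move =>
          if h ≠ 0 then
            if round > move then pvStep vis 0 1 else pvStep vis 1 (-1)
          else
            if round > move then pvStep vis 1 1 else pvStep vis 0 (-1)) visited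
      (visited, if h ≠ 0 then (0 : Int) else 1))
    ([[0, 0]], horizontal)).1

-- ===== PORT B =====
-- closed form for the i-th spiral point (Source B's 'point'); math.isqrt → Nat.sqrt
def pvPoint (horizontal : Int) (i : Int) : List Int :=
  let k : Int := (Nat.sqrt i.toNat : Int)
  if k = 0 then [0, 0]
  else
    let p := k - 1
    let q := PySem.Int.floordiv p 2
    let odd : Bool := PySem.Int.mod p 2 == 1
    let sr : Int := if horizontal ≠ 0 then (if odd then p else 0) else 2 * q + (if odd then 1 - p else 0)
    let sc : Int := if horizontal ≠ 0 then 2 * q + (if odd then 1 - p else 0) else (if odd then p else 0)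
    let flag : Bool := if horizontal ≠ 0 then PySem.Int.mod k 2 == 1 else PySem.Int.mod k 2 == 0
    let j := i - k * k
    if flag then
      if j = 0 then [sr, sc + 1]
      else if j ≤ k then [sr + j, sc + 1]
      else [sr + k, sc + 1 - (j - k)]
    else
      if j = 0 then [sr + 1, sc]
      else if j ≤ k then [sr + 1, sc + j]
      else [sr + 1 - (j - k), sc + k]

def solution_alt (rounds : Int) (horizontal : Int) : List (List Int) :=
  let n := max rounds 1
  (PySem.List.pyRange 0 (n * n) 1).map (pvPoint horizontal)

-- ===== PRECONDITION & SPEC =====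
def Spec_solution (rounds : Int) (horizontal : Int) (out : List (List Int)) : Prop := out = solution_alt rounds horizontal
instance (rounds : Int) (horizontal : Int) (out : List (List Int)) : Decidable (Spec_solution rounds horizontal out) := by unfold Spec_solution; infer_instance

-- ===== CLAIM (what is proved, stated in full; the proofs are below) =====
def Claim_equal_solution : Prop := ∀ (rounds : Int) (horizontal : Int), Dom_solution rounds horizontal → Spec_solution rounds horizontal (solution rounds horizontal)

-- ===== LEMMAS AND PROOFS =====

-- closed forms used by the proof (start corner and orientation of ring k)
def pvSr (h0 : Bool) (k : Int) : Int :=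
  if h0 then (if (k - 1) % 2 = 1 then k - 1 else 0)
  else 2 * ((k - 1) / 2) + (if (k - 1) % 2 = 1 then 1 - (k - 1) else 0)

def pvSc (h0 : Bool) (k : Int) : Int :=
  if h0 then 2 * ((k - 1) / 2) + (if (k - 1) % 2 = 1 then 1 - (k - 1) else 0)
  else (if (k - 1) % 2 = 1 then k - 1 else 0)

def pvFlag (h0 : Bool) (k : Int) : Bool :=
  if h0 then decide (k % 2 = 1) else decide (k % 2 = 0)

def pvV (horizontal : Int) (m : Nat) : List (List Int) :=
  (List.range (m * m)).map (fun (t : Nat) => pvPoint horizontal (t : Int))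

-- a fold that ignores the elements is the length-fold iterate
theorem pvFoldlConst {α β : Type} (f : α → α) : ∀ (L : List β) (a : α),
    L.foldl (fun a _ => f a) a = f^[L.length] a := by
  intro L
  induction L with
  | nil => intro a; rfl
  | cons x t ih =>
    intro a
    simp [List.foldl, ih, Function.iterate_succ_apply]

theorem pvFoldlCongrMem {α β : Type} (L : List β) (f g : α → β → α)
    (h : ∀ x ∈ L, ∀ acc, f acc x = g acc x) :
    ∀ init, L.foldl f init = L.foldl g init := by
  induction L with
  | nil => intro _; rfl
  | cons x t ih =>
    intro init
    simp only [List.foldl_cons]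
    rw [h x (by simp)]
    exact ih (fun y hy acc => h y (by simp [hy]) acc) _

-- proof-side name for A's loop body (definitionally the inline lambda)
def pvA (st : List (List Int) × Int) (round : Int) : List (List Int) × Int :=
  let visited := st.1
  let h := st.2
  let visited := if h ≠ 0 then pvStep visited 1 1 else pvStep visited 0 1
  let visited := (PySem.List.pyRange 0 (round * 2) 1).foldl
    (fun vis move =>
      if h ≠ 0 then
        if round > move then pvStep vis 0 1 else pvStep vis 1 (-1)
      else
        if round > move then pvStep vis 1 1 else pvStep vis 0 (-1)) visited
  (visited, if h ≠ 0 then (0 : Int) else 1)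

theorem pvA_eq (st : List (List Int) × Int) (k : Int) (hne : st.2 ≠ 0) (hk : 1 ≤ k) :
    pvA st k =
      ((fun v => pvStep v 1 (-1))^[k.toNat]
        ((fun v => pvStep v 0 1)^[k.toNat] (pvStep st.1 1 1)), 0) := by
  have hsplit : PySem.List.pyRange 0 (k * 2) 1
      = PySem.List.pyRange 0 k 1 ++ PySem.List.pyRange k (k * 2) 1 :=
    PySem.List.pyRange_one_append 0 k (k * 2) (by omega) (by omega)
  simp only [pvA, if_pos hne, hsplit, List.foldl_append]
  rw [pvFoldlCongrMem (PySem.List.pyRange 0 k 1) _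
      (fun (vis : List (List Int)) (_ : Int) => pvStep vis 0 1)
      (by intro x hx acc
          rcases (PySem.List.mem_pyRange_one).1 hx with ⟨h1, h2⟩
          simp [h2])]
  rw [pvFoldlCongrMem (PySem.List.pyRange k (k * 2) 1) _
      (fun (vis : List (List Int)) (_ : Int) => pvStep vis 1 (-1))
      (by intro x hx acc
          rcases (PySem.List.mem_pyRange_one).1 hx with ⟨h1, h2⟩
          simp [not_lt.2 h1])]
  rw [pvFoldlConst, pvFoldlConst, PySem.List.length_pyRange_one,
    PySem.List.length_pyRange_one,
    (by omega : (k - 0).toNat = k.toNat), (by omega : (k * 2 - k).toNat = k.toNat)]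

theorem pvA_eq' (st : List (List Int) × Int) (k : Int) (hz : st.2 = 0) (hk : 1 ≤ k) :
    pvA st k =
      ((fun v => pvStep v 0 (-1))^[k.toNat]
        ((fun v => pvStep v 1 1)^[k.toNat] (pvStep st.1 0 1)), 1) := by
  have hsplit : PySem.List.pyRange 0 (k * 2) 1
      = PySem.List.pyRange 0 k 1 ++ PySem.List.pyRange k (k * 2) 1 :=
    PySem.List.pyRange_one_append 0 k (k * 2) (by omega) (by omega)
  simp only [pvA, hz, if_neg (by simp : ¬ (0:Int) ≠ 0), hsplit, List.foldl_append]
  rw [pvFoldlCongrMem (PySem.List.pyRange 0 k 1) _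
      (fun (vis : List (List Int)) (_ : Int) => pvStep vis 1 1)
      (by intro x hx acc
          rcases (PySem.List.mem_pyRange_one).1 hx with ⟨h1, h2⟩
          simp [h2])]
  rw [pvFoldlCongrMem (PySem.List.pyRange k (k * 2) 1) _
      (fun (vis : List (List Int)) (_ : Int) => pvStep vis 0 (-1))
      (by intro x hx acc
          rcases (PySem.List.mem_pyRange_one).1 hx with ⟨h1, h2⟩
          simp [not_lt.2 h1])]
  rw [pvFoldlConst, pvFoldlConst, PySem.List.length_pyRange_one,
    PySem.List.length_pyRange_one,
    (by omega : (k - 0).toNat = k.toNat), (by omega : (k * 2 - k).toNat = k.toNat)]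

-- shift a range' under a map
theorem pvShift {α : Type} (f : Nat → α) (k : Nat) : ∀ (n s : Nat),
    (List.range' (s + k) n).map f = (List.range' s n).map (fun t => f (t + k)) := by
  intro n
  induction n with
  | zero => intro s; rfl
  | succ m ih =>
    intro s
    rw [List.range'_succ, List.range'_succ]
    simp only [List.map_cons]
    rw [show s + k + 1 = (s + 1) + k by omega, ih (s + 1)]

-- one append step, stated over an opaque list
theorem pvStep0 (v : List (List Int)) (r c d : Int) (h : v.getLastD [] = [r, c]) :
    pvStep v 0 d = v ++ [[r + d, c]] ∧ (pvStep v 0 d).getLastD [] = [r + d, c] := by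
  rw [List.getLastD_eq_getLast?] at h
  constructor
  · simp [pvStep, List.getLastD_eq_getLast?, h, List.modify]
  · simp [pvStep, List.getLastD_eq_getLast?, h, List.modify]

theorem pvStep1 (v : List (List Int)) (r c d : Int) (h : v.getLastD [] = [r, c]) :
    pvStep v 1 d = v ++ [[r, c + d]] ∧ (pvStep v 1 d).getLastD [] = [r, c + d] := by
  rw [List.getLastD_eq_getLast?] at h
  constructor
  · simp [pvStep, List.getLastD_eq_getLast?, h, List.modify]
  · simp [pvStep, List.getLastD_eq_getLast?, h, List.modify]

-- vertical arm: n steps changing the row by d, as an explicit appended list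
theorem pvArmVL (d : Int) : ∀ (n : Nat) (vis : List (List Int)) (r c : Int),
    vis.getLastD [] = [r, c] →
    (fun v => pvStep v 0 d)^[n] vis
        = vis ++ (List.range' 1 n).map (fun (t : Nat) => ([r + d * (t : Int), c] : List Int))
      ∧ ((fun v => pvStep v 0 d)^[n] vis).getLastD [] = [r + d * n, c] := by
  intro n
  induction n with
  | zero => intro vis r c hl; simpa using hl
  | succ m ih =>
    intro vis r c hl
    obtain ⟨ihA, ihB⟩ := ih vis r c hl
    obtain ⟨s1, s2⟩ := pvStep0 ((fun v => pvStep v 0 d)^[m] vis) (r + d * m) c d ihB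
    constructor
    · rw [Function.iterate_succ_apply', s1, ihA, List.range'_concat]
      simp only [List.map_append, List.map_cons, List.map_nil, List.append_assoc]
      push_cast
      ring_nf
    · rw [Function.iterate_succ_apply', s2]
      push_cast
      ring_nf

-- horizontal arm: n steps changing the column by d
theorem pvArmHL (d : Int) : ∀ (n : Nat) (vis : List (List Int)) (r c : Int),
    vis.getLastD [] = [r, c] →
    (fun v => pvStep v 1 d)^[n] vis
        = vis ++ (List.range' 1 n).map (fun (t : Nat) => ([r, c + d * (t : Int)] : List Int))
      ∧ ((fun v => pvStep v 1 d)^[n] vis).getLastD [] = [r, c + d * n] := by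
  intro n
  induction n with
  | zero => intro vis r c hl; simpa using hl
  | succ m ih =>
    intro vis r c hl
    obtain ⟨ihA, ihB⟩ := ih vis r c hl
    obtain ⟨s1, s2⟩ := pvStep1 ((fun v => pvStep v 1 d)^[m] vis) r (c + d * m) d ihB
    constructor
    · rw [Function.iterate_succ_apply', s1, ihA, List.range'_concat]
      simp only [List.map_append, List.map_cons, List.map_nil, List.append_assoc]
      push_cast
      ring_nf
    · rw [Function.iterate_succ_apply', s2]
      push_cast
      ring_nf

-- one whole round of A, flag truthy: right once, down m, left m
theorem pvRoundA_true (vis : List (List Int)) (r c h : Int) (m : Nat) (hm : 1 ≤ m)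
    (hne : h ≠ 0) (hl : vis.getLastD [] = [r, c]) :
    pvA (vis, h) (m : Int)
      = (vis ++ ([[r, c + 1]]
          ++ (List.range' 1 m).map (fun (t : Nat) => ([r + (t : Int), c + 1] : List Int))
          ++ (List.range' 1 m).map (fun (t : Nat) => ([r + (m : Int), c + 1 - (t : Int)] : List Int))), 0)
    ∧ ((pvA (vis, h) (m : Int)).1).getLastD [] = [r + (m : Int), c + 1 - (m : Int)] := by
  have he := pvA_eq (vis, h) (m : Int) hne (by exact_mod_cast hm)
  simp only [Int.toNat_natCast] at he
  obtain ⟨f1, f2⟩ := pvStep1 vis r c 1 hl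
  obtain ⟨aV1, aV2⟩ := pvArmVL 1 m (pvStep vis 1 1) r (c + 1) f2
  obtain ⟨aH1, aH2⟩ := pvArmHL (-1) m ((fun v => pvStep v 0 1)^[m] (pvStep vis 1 1))
      (r + 1 * (m : Int)) (c + 1) aV2
  constructor
  · rw [he, aH1, aV1, f1]
    simp only [one_mul, neg_one_mul, ← sub_eq_add_neg, List.append_assoc]
  · rw [he]
    dsimp only
    rw [aH2]
    ring_nf

-- one whole round of A, flag falsy: down once, right m, up m
theorem pvRoundA_false (vis : List (List Int)) (r c h : Int) (m : Nat) (hm : 1 ≤ m)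
    (hz : h = 0) (hl : vis.getLastD [] = [r, c]) :
    pvA (vis, h) (m : Int)
      = (vis ++ ([[r + 1, c]]
          ++ (List.range' 1 m).map (fun (t : Nat) => ([r + 1, c + (t : Int)] : List Int))
          ++ (List.range' 1 m).map (fun (t : Nat) => ([r + 1 - (t : Int), c + (m : Int)] : List Int))), 1)
    ∧ ((pvA (vis, h) (m : Int)).1).getLastD [] = [r + 1 - (m : Int), c + (m : Int)] := by
  have he := pvA_eq' (vis, h) (m : Int) hz (by exact_mod_cast hm)
  simp only [Int.toNat_natCast] at he
  obtain ⟨f1, f2⟩ := pvStep0 vis r c 1 hl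
  obtain ⟨aH1, aH2⟩ := pvArmHL 1 m (pvStep vis 0 1) (r + 1) c f2
  obtain ⟨aV1, aV2⟩ := pvArmVL (-1) m ((fun v => pvStep v 1 1)^[m] (pvStep vis 0 1))
      (r + 1) (c + 1 * (m : Int)) aH2
  constructor
  · rw [he, aV1, aH1, f1]
    simp only [one_mul, neg_one_mul, ← sub_eq_add_neg, List.append_assoc]
  · rw [he]
    dsimp only
    rw [aV2]
    ring_nf

theorem pvSqrt (m t : Nat) (ht : t ≤ 2 * m) : Nat.sqrt (m * m + t) = m := by
  have h1 : m ≤ Nat.sqrt (m * m + t) := Nat.le_sqrt.mpr (by omega)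
  have h2 : Nat.sqrt (m * m + t) < m + 1 := by
    rw [Nat.sqrt_lt]
    nlinarith
  omega

-- what the closed form evaluates to on index m*m + t of ring m
theorem pvPoint_spec (horizontal : Int) (m t : Nat) (hm : 1 ≤ m) (ht : t ≤ 2 * m) :
    pvPoint horizontal ((m * m + t : Nat) : Int)
      = (if pvFlag (horizontal != 0) m then
           if (t : Int) = 0 then [pvSr (horizontal != 0) m, pvSc (horizontal != 0) m + 1]
           else if (t : Int) ≤ (m : Int) then
             [pvSr (horizontal != 0) m + (t : Int), pvSc (horizontal != 0) m + 1]
           else [pvSr (horizontal != 0) m + (m : Int),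
                 pvSc (horizontal != 0) m + 1 - ((t : Int) - (m : Int))]
         else
           if (t : Int) = 0 then [pvSr (horizontal != 0) m + 1, pvSc (horizontal != 0) m]
           else if (t : Int) ≤ (m : Int) then
             [pvSr (horizontal != 0) m + 1, pvSc (horizontal != 0) m + (t : Int)]
           else [pvSr (horizontal != 0) m + 1 - ((t : Int) - (m : Int)),
                 pvSc (horizontal != 0) m + (m : Int)]) := by
  have hk0 : ((m : Nat) : Int) ≠ 0 := by exact_mod_cast Nat.one_le_iff_ne_zero.mp hm
  have hj : ((m * m + t : Nat) : Int) - (m : Int) * (m : Int) = (t : Int) := by push_cast; ring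
  unfold pvPoint
  rw [Int.toNat_natCast, pvSqrt m t ht]
  simp only [if_neg hk0, hj,
    PySem.Int.mod_eq_emod_of_pos (by norm_num : (0:Int) < 2),
    PySem.Int.floordiv_eq_ediv_of_pos (by norm_num : (0:Int) < 2)]
  by_cases hh : horizontal = 0
  · rcases Int.emod_two_eq ((m : Int) - 1) with hp | hp
    · have hq : (m : Int) % 2 = 1 := by omega
      simp [pvFlag, pvSr, pvSc, hh, hp, hq]
    · have hq : (m : Int) % 2 = 0 := by omega
      simp [pvFlag, pvSr, pvSc, hh, hp, hq]
  · rcases Int.emod_two_eq ((m : Int) - 1) with hp | hp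
    · have hq : (m : Int) % 2 = 1 := by omega
      simp [pvFlag, pvSr, pvSc, hh, hp, hq]
    · have hq : (m : Int) % 2 = 0 := by omega
      simp [pvFlag, pvSr, pvSc, hh, hp, hq]

-- one more ring of closed-form points
theorem pvVsucc (horizontal : Int) (m : Nat) (hm : 1 ≤ m) :
    pvV horizontal (m + 1)
      = pvV horizontal m ++
        (if pvFlag (horizontal != 0) m then
          [[pvSr (horizontal != 0) m, pvSc (horizontal != 0) m + 1]]
            ++ (List.range' 1 m).map (fun (t : Nat) =>
                ([pvSr (horizontal != 0) m + (t : Int), pvSc (horizontal != 0) m + 1] : List Int))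
            ++ (List.range' 1 m).map (fun (t : Nat) =>
                ([pvSr (horizontal != 0) m + (m : Int),
                  pvSc (horizontal != 0) m + 1 - (t : Int)] : List Int))
        else
          [[pvSr (horizontal != 0) m + 1, pvSc (horizontal != 0) m]]
            ++ (List.range' 1 m).map (fun (t : Nat) =>
                ([pvSr (horizontal != 0) m + 1, pvSc (horizontal != 0) m + (t : Int)] : List Int))
            ++ (List.range' 1 m).map (fun (t : Nat) =>
                ([pvSr (horizontal != 0) m + 1 - (t : Int),
                  pvSc (horizontal != 0) m + (m : Int)] : List Int))) := by
  have hsz : (m + 1) * (m + 1) = m * m + (1 + (m + m)) := by ring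
  have a1 : List.range' 1 m 1 ++ List.range' (1 + 1 * m) m 1 = List.range' 1 (m + m) 1 :=
    List.range'_append
  have a2 : List.range' 0 1 1 ++ List.range' (0 + 1 * 1) (m + m) 1 = List.range' 0 (1 + (m + m)) 1 :=
    List.range'_append
  simp only [one_mul, Nat.zero_add] at a1 a2
  have hsplit : List.range (1 + (m + m)) = [0] ++ (List.range' 1 m ++ List.range' (1 + m) m) := by
    rw [List.range_eq_range', ← a2, ← a1, List.range'_one]
  unfold pvV
  rw [hsz, List.range_add, List.map_append, List.map_map, hsplit]
  simp only [List.map_append, Function.comp_def]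
  congr 1
  have hshift := pvShift (fun x : Nat => pvPoint horizontal ((m * m + x : Nat) : Int)) m m 1
  rw [hshift]
  by_cases hf : pvFlag (horizontal != 0) m = true
  · rw [if_pos hf]
    have s0 : pvPoint horizontal ((m * m + 0 : Nat) : Int)
        = [pvSr (horizontal != 0) m, pvSc (horizontal != 0) m + 1] := by
      rw [pvPoint_spec horizontal m 0 hm (by omega)]
      simp [hf]
    have s1 : (List.range' 1 m).map (fun x : Nat => pvPoint horizontal ((m * m + x : Nat) : Int))
        = (List.range' 1 m).map (fun (t : Nat) =>
            ([pvSr (horizontal != 0) m + (t : Int), pvSc (horizontal != 0) m + 1] : List Int)) := by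
      apply List.map_congr_left
      intro t htm
      rw [List.mem_range'_1] at htm
      rw [pvPoint_spec horizontal m t hm (by omega), if_pos hf,
        if_neg (by omega), if_pos (by omega)]
    have s2 : (List.range' 1 m).map (fun t : Nat => pvPoint horizontal ((m * m + (t + m) : Nat) : Int))
        = (List.range' 1 m).map (fun (t : Nat) =>
            ([pvSr (horizontal != 0) m + (m : Int),
              pvSc (horizontal != 0) m + 1 - (t : Int)] : List Int)) := by
      apply List.map_congr_left
      intro t htm
      rw [List.mem_range'_1] at htm
      rw [pvPoint_spec horizontal m (t + m) hm (by omega), if_pos hf,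
        if_neg (by omega), if_neg (by omega)]
      have : ((t + m : Nat) : Int) - (m : Int) = (t : Int) := by push_cast; ring
      rw [this]
    rw [s1, s2]
    simp only [List.map_cons, List.map_nil]
    rw [s0]
    simp
  · rw [if_neg hf]
    have s0 : pvPoint horizontal ((m * m + 0 : Nat) : Int)
        = [pvSr (horizontal != 0) m + 1, pvSc (horizontal != 0) m] := by
      rw [pvPoint_spec horizontal m 0 hm (by omega)]
      simp [hf]
    have s1 : (List.range' 1 m).map (fun x : Nat => pvPoint horizontal ((m * m + x : Nat) : Int))
        = (List.range' 1 m).map (fun (t : Nat) =>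
            ([pvSr (horizontal != 0) m + 1, pvSc (horizontal != 0) m + (t : Int)] : List Int)) := by
      apply List.map_congr_left
      intro t htm
      rw [List.mem_range'_1] at htm
      rw [pvPoint_spec horizontal m t hm (by omega), if_neg hf,
        if_neg (by omega), if_pos (by omega)]
    have s2 : (List.range' 1 m).map (fun t : Nat => pvPoint horizontal ((m * m + (t + m) : Nat) : Int))
        = (List.range' 1 m).map (fun (t : Nat) =>
            ([pvSr (horizontal != 0) m + 1 - (t : Int),
              pvSc (horizontal != 0) m + (m : Int)] : List Int)) := by
      apply List.map_congr_left
      intro t htm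
      rw [List.mem_range'_1] at htm
      rw [pvPoint_spec horizontal m (t + m) hm (by omega), if_neg hf,
        if_neg (by omega), if_neg (by omega)]
      have : ((t + m : Nat) : Int) - (m : Int) = (t : Int) := by push_cast; ring
      rw [this]
    rw [s1, s2]
    simp only [List.map_cons, List.map_nil]
    rw [s0]
    simp

theorem pvFlag_one (h0 : Bool) : pvFlag h0 1 = h0 := by
  cases h0 <;> norm_num [pvFlag]

theorem pvFlag_succ (h0 : Bool) (k : Int) : pvFlag h0 (k + 1) = !pvFlag h0 k := by
  rcases Int.emod_two_eq k with hp | hp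
  · have hq : (k + 1) % 2 = 1 := by omega
    cases h0 <;> simp [pvFlag, hp, hq]
  · have hq : (k + 1) % 2 = 0 := by omega
    cases h0 <;> simp [pvFlag, hp, hq]

theorem pvS_one (h0 : Bool) : pvSr h0 1 = 0 ∧ pvSc h0 1 = 0 := by
  cases h0 <;> norm_num [pvSr, pvSc]

theorem pvS_succ_true (h0 : Bool) (k : Int) (hk : 1 ≤ k) (hf : pvFlag h0 k = true) :
    pvSr h0 (k + 1) = pvSr h0 k + k ∧ pvSc h0 (k + 1) = pvSc h0 k + 1 - k := by
  cases h0 <;> simp only [pvFlag, decide_eq_true_eq, if_true,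
    Bool.false_eq_true, ite_false] at hf <;>
    simp only [pvSr, pvSc, if_true, Bool.false_eq_true, ite_false] <;>
    constructor <;> split_ifs <;> omega

theorem pvS_succ_false (h0 : Bool) (k : Int) (hk : 1 ≤ k) (hf : pvFlag h0 k = false) :
    pvSr h0 (k + 1) = pvSr h0 k + 1 - k ∧ pvSc h0 (k + 1) = pvSc h0 k + k := by
  cases h0 <;> simp only [pvFlag, decide_eq_false_iff_not, if_true,
    Bool.false_eq_true, ite_false] at hf <;>
    simp only [pvSr, pvSc, if_true, Bool.false_eq_true, ite_false] <;>
    constructor <;> split_ifs <;> omega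

theorem pvV_one (horizontal : Int) : pvV horizontal 1 = [[0, 0]] := by
  simp [pvV, pvPoint, List.range_succ]

-- the main invariant: after rounds 1..M, A's visited list is the first (M+1)^2 closed-form points
theorem pvMain (horizontal : Int) : ∀ M : Nat,
    ∃ h' : Int,
      (PySem.List.pyRange 1 ((M : Int) + 1) 1).foldl pvA ([[0, 0]], horizontal)
          = (pvV horizontal (M + 1), h')
        ∧ ((h' ≠ 0) ↔ pvFlag (horizontal != 0) (((M + 1 : Nat) : Int)) = true)
        ∧ (pvV horizontal (M + 1)).getLastD []
            = [pvSr (horizontal != 0) (((M + 1 : Nat) : Int)),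
               pvSc (horizontal != 0) (((M + 1 : Nat) : Int))] := by
  intro M
  induction M with
  | zero =>
    refine ⟨horizontal, ?_, ?_, ?_⟩
    · rw [show ((0 : Nat) : Int) + 1 = 1 by norm_num, PySem.List.pyRange_one_eq_nil (le_refl 1)]
      rw [pvV_one]
      rfl
    · rw [show (((0 + 1 : Nat)) : Int) = 1 by norm_num, pvFlag_one]
      simp [bne_iff_ne]
    · rw [pvV_one]
      obtain ⟨e1, e2⟩ := pvS_one (horizontal != 0)
      rw [show (((0 + 1 : Nat)) : Int) = 1 by norm_num, e1, e2]
      rfl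
  | succ M ih =>
    obtain ⟨h', e1, e2, e3⟩ := ih
    have hpeel : PySem.List.pyRange 1 (((M + 1 : Nat) : Int) + 1) 1
        = PySem.List.pyRange 1 ((M : Int) + 1) 1 ++ [(M : Int) + 1] := by
      rw [show (((M + 1 : Nat) : Int) + 1) = ((M : Int) + 1) + 1 by push_cast; ring]
      exact PySem.List.pyRange_one_succ_right (by omega)
    have hcast : ((M : Int) + 1) = (((M + 1 : Nat)) : Int) := by push_cast; ring
    rw [hpeel, List.foldl_append, e1, List.foldl_cons, List.foldl_nil]
    by_cases hf : pvFlag (horizontal != 0) (((M + 1 : Nat)) : Int) = true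
    · have hne : h' ≠ 0 := e2.mpr hf
      obtain ⟨r1, r2⟩ := pvRoundA_true (pvV horizontal (M + 1))
        (pvSr (horizontal != 0) (((M + 1 : Nat)) : Int))
        (pvSc (horizontal != 0) (((M + 1 : Nat)) : Int)) h' (M + 1) (by omega) hne e3
      obtain ⟨q1, q2⟩ := pvS_succ_true (horizontal != 0) (((M + 1 : Nat)) : Int) (by omega) hf
      refine ⟨0, ?_, ?_, ?_⟩
      · rw [hcast, r1, pvVsucc horizontal (M + 1) (by omega), if_pos hf]
      · rw [show (((M + 1 + 1 : Nat)) : Int) = (((M + 1 : Nat)) : Int) + 1 by push_cast; ring,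
          pvFlag_succ, hf]
        simp
      · have hv : pvV horizontal (M + 1 + 1) = (pvA (pvV horizontal (M + 1), h') (((M + 1 : Nat)) : Int)).1 := by
          rw [r1, pvVsucc horizontal (M + 1) (by omega), if_pos hf]
        rw [hv, r2,
          show (((M + 1 + 1 : Nat)) : Int) = (((M + 1 : Nat)) : Int) + 1 by push_cast; ring,
          q1, q2]
    · have hz : h' = 0 := by
        by_contra hne
        exact hf (e2.mp hne)
      obtain ⟨r1, r2⟩ := pvRoundA_false (pvV horizontal (M + 1))
        (pvSr (horizontal != 0) (((M + 1 : Nat)) : Int))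
        (pvSc (horizontal != 0) (((M + 1 : Nat)) : Int)) h' (M + 1) (by omega) hz e3
      obtain ⟨q1, q2⟩ := pvS_succ_false (horizontal != 0) (((M + 1 : Nat)) : Int) (by omega)
        (by simpa using hf)
      refine ⟨1, ?_, ?_, ?_⟩
      · rw [hcast, r1, pvVsucc horizontal (M + 1) (by omega), if_neg hf]
      · rw [show (((M + 1 + 1 : Nat)) : Int) = (((M + 1 : Nat)) : Int) + 1 by push_cast; ring,
          pvFlag_succ]
        simp [Bool.not_eq_true] at hf ⊢
        simp [hf]
      · have hv : pvV horizontal (M + 1 + 1) = (pvA (pvV horizontal (M + 1), h') (((M + 1 : Nat)) : Int)).1 := by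
          rw [r1, pvVsucc horizontal (M + 1) (by omega), if_neg hf]
        rw [hv, r2,
          show (((M + 1 + 1 : Nat)) : Int) = (((M + 1 : Nat)) : Int) + 1 by push_cast; ring,
          q1, q2]

-- ===== VERDICT (by name: the statement is the Claim_ definition above) =====
theorem solution_spec : Claim_equal_solution := by
  intro rounds horizontal _
  show solution rounds horizontal = solution_alt rounds horizontal
  by_cases hr : rounds ≤ 1
  · have hA : solution rounds horizontal = [[0, 0]] := by
      unfold solution
      rw [PySem.List.pyRange_one_eq_nil hr]
      rfl
    have hB : solution_alt rounds horizontal = [[0, 0]] := by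
      unfold solution_alt
      rw [show max rounds 1 = 1 from by omega]
      show List.map (pvPoint horizontal) (PySem.List.pyRange 0 (1 * 1) 1) = [[0, 0]]
      rw [show (1 : Int) * 1 = 0 + 1 by ring, PySem.List.pyRange_one_singleton]
      simp [pvPoint]
    rw [hA, hB]
  · rw [not_le] at hr
    have hM : rounds = (((rounds - 1).toNat : Nat) : Int) + 1 := by omega
    obtain ⟨h', e1, _, _⟩ := pvMain horizontal (rounds - 1).toNat
    have hA2 : solution rounds horizontal = pvV horizontal ((rounds - 1).toNat + 1) := by
      have hA : solution rounds horizontal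
          = ((PySem.List.pyRange 1 rounds 1).foldl pvA ([[0, 0]], horizontal)).1 := rfl
      rw [hA]
      conv_lhs => rw [hM]
      rw [e1]
    have hB : solution_alt rounds horizontal = pvV horizontal ((rounds - 1).toNat + 1) := by
      unfold solution_alt
      rw [show max rounds 1 = rounds from by omega]
      show List.map (pvPoint horizontal) (PySem.List.pyRange 0 (rounds * rounds) 1) = _
      rw [show rounds * rounds
          = ((((rounds - 1).toNat + 1) * ((rounds - 1).toNat + 1) : Nat) : Int) from by
            have hn : (((rounds - 1).toNat : Nat) : Int) = rounds - 1 := Int.toNat_of_nonneg (by omega)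
            push_cast [hn]; ring,
        PySem.List.pyRange_zero_nat, List.map_map]
      rfl
    rw [hA2, hB]
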